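-- pv_equiv track=rewrite | github.com/xilaili/AOGNet | symbol/node.py | get_slice_indice
-- ===== SOURCE A (Python) =====
-- def get_slice_indice(channels, dim):
--     slices = [0] * dim
--     for i in range(channels):
--         slices[i%dim] += 1
--     for d in range(1, dim):
--         slices[d] += slices[d-1]
--     slices = [0] + slices
--     return slices
-- ===== SOURCE B (Python) =====
-- def get_slice_indice(channels, dim):
--     # One pass over the bins: each bin's channel count in closed form (ceiling
--     # division), accumulated directly into the running prefix sum.
--     out = [0]
--     total = 0
--     for j in range(dim):
--         total += max(0, (channels - j + dim - 1) // dim)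
--         out.append(total)
--     return out
-- ===== Notes on version B (the rewrite author's own statement) =====
-- stated objective: alternative
-- what changed: B replaces A's per-channel round-robin increment loop plus separate in-place prefix-sum pass by a single pass over the bins that computes each bin's channel count in closed form (ceiling division) and accumulates it directly into the running prefix sum.
import Mathlib
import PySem

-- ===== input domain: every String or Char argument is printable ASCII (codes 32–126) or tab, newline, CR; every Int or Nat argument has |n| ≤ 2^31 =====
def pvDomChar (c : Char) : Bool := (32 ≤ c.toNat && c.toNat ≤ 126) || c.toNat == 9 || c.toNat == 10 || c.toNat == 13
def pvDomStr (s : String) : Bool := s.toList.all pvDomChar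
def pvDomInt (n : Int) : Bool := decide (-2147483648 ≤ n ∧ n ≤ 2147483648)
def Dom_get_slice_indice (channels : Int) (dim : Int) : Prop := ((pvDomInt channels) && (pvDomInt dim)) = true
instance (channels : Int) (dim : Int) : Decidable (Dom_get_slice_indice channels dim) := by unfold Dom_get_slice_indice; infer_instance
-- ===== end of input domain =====

-- B replaces A's per-channel round-robin increment loop and separate prefix-sum pass by a
-- single pass over the bins: each bin's count in closed form (ceiling division), accumulated
-- directly into the running prefix sum.

-- ===== PORT A =====
def get_slice_indice (channels : Int) (dim : Int) : List Int :=
  let slices := List.replicate dim.toNat (0 : Int)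
  let slices := (PySem.List.pyRange 0 channels 1).foldl
    (fun s i =>
      PySem.List.pySetD s (PySem.Int.mod i dim) (PySem.List.pyGetD s (PySem.Int.mod i dim) 0 + 1)) slices
  let slices := (PySem.List.pyRange 1 dim 1).foldl
    (fun s d =>
      PySem.List.pySetD s d (PySem.List.pyGetD s d 0 + PySem.List.pyGetD s (d - 1) 0)) slices
  (0 : Int) :: slices

-- ===== PORT B =====
def get_slice_indice_alt (channels : Int) (dim : Int) : List Int :=
  ((PySem.List.pyRange 0 dim 1).foldl
    (fun (p : List Int × Int) j =>
      let t := p.2 + max 0 (PySem.Int.floordiv (channels - j + dim - 1) dim)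
      (p.1 ++ [t], t)) ([0], 0)).1

-- ===== PRECONDITION & SPEC =====
-- Pre_ is exactly the set of inputs on which the Python A returns normally: for dim ≤ 0
-- and channels ≥ 1, A raises (ZeroDivisionError for dim = 0, IndexError for dim < 0).
def Pre_get_slice_indice (channels : Int) (dim : Int) : Prop := 1 ≤ dim ∨ channels ≤ 0
instance (channels : Int) (dim : Int) : Decidable (Pre_get_slice_indice channels dim) := by
  unfold Pre_get_slice_indice; infer_instance

def pvWitness_get_slice_indice : Int × Int := (7, 3)

def Spec_get_slice_indice (channels : Int) (dim : Int) (out : List Int) : Prop := out = get_slice_indice_alt channels dim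
instance (channels : Int) (dim : Int) (out : List Int) : Decidable (Spec_get_slice_indice channels dim out) := by unfold Spec_get_slice_indice; infer_instance

-- ===== CLAIM (what is proved, stated in full; the proofs are below) =====
def Claim_equal_get_slice_indice : Prop := ∀ (channels : Int) (dim : Int), Dom_get_slice_indice channels dim → Pre_get_slice_indice channels dim → Spec_get_slice_indice channels dim (get_slice_indice channels dim)

-- ===== LEMMAS AND PROOFS =====

-- closed-form count of channels landing in bin j: #{i ∈ [0,channels) | i % dim = j}
def pvF (channels dim j : Int) : Int := max 0 (PySem.Int.floordiv (channels - j + dim - 1) dim)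

-- running prefix sums of pvF
def pvG (channels dim : Int) : Nat → Int
  | 0 => 0
  | n + 1 => pvG channels dim n + pvF channels dim (n : Int)

-- mixed state of A's second loop: entries up to m are prefix sums, the rest untouched counts
def pvMix (channels dim : Int) (m : Nat) : List Int :=
  (List.range dim.toNat).map (fun k : Nat => if k ≤ m then pvG channels dim (k + 1) else pvF channels dim (k : Int))

theorem pvF_zero (channels dim j : Int) (hd : 0 < dim) (hc : channels ≤ 0)
    (hj : 0 ≤ j) : pvF channels dim j = 0 := by
  unfold pvF
  rw [PySem.Int.floordiv_eq_ediv_of_pos hd]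
  have h : (channels - j + dim - 1) / dim < 1 := by
    apply Int.ediv_lt_of_lt_mul hd; omega
  omega

theorem pvF_step (m dim j : Int) (hd : 0 < dim) (hm : 0 ≤ m) (hj : 0 ≤ j) (hjd : j < dim) :
    pvF (m + 1) dim j = pvF m dim j + (if PySem.Int.mod m dim = j then 1 else 0) := by
  unfold pvF
  rw [PySem.Int.floordiv_eq_ediv_of_pos hd, PySem.Int.floordiv_eq_ediv_of_pos hd,
      PySem.Int.mod_eq_emod_of_pos hd]
  set s := (m - j) % dim with hs
  set q := (m - j) / dim with hq
  have hsb : 0 ≤ s ∧ s < dim := ⟨Int.emod_nonneg _ (by omega), Int.emod_lt_of_pos _ hd⟩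
  have hqs : q * dim + s = m - j := by rw [hq, hs]; rw [mul_comm]; exact Int.mul_ediv_add_emod _ _
  clear_value s q
  have h1 : (m - j + dim - 1) / dim = (if s = 0 then 0 else 1) + q := by
    have : m - j + dim - 1 = (s + dim - 1) + q * dim := by omega
    rw [this, Int.add_mul_ediv_right _ _ (by omega : dim ≠ 0)]
    congr 1
    by_cases h0 : s = 0
    · simp [h0]; exact Int.ediv_eq_zero_of_lt (by omega) (by omega)
    · simp [h0]
      have : s + dim - 1 = (s - 1) + 1 * dim := by ring
      rw [this, Int.add_mul_ediv_right _ _ (by omega : dim ≠ 0),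
          Int.ediv_eq_zero_of_lt (by omega) (by omega)]
      norm_num
  have h2 : (m + 1 - j + dim - 1) / dim = q + 1 := by
    have : m + 1 - j + dim - 1 = s + (q + 1) * dim := by rw [add_mul, one_mul]; omega
    rw [this, Int.add_mul_ediv_right _ _ (by omega : dim ≠ 0),
        Int.ediv_eq_zero_of_lt (by omega) (by omega)]
    ring
  have h3 : m % dim = j ↔ s = 0 := by
    have hm' : m = (s + j) + dim * q := by rw [mul_comm]; omega
    have e1 : m % dim = (s + j) % dim := by rw [hm', Int.add_mul_emod_self_left]
    by_cases hlt : s + j < dim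
    · rw [e1, Int.emod_eq_of_lt (by omega) hlt]; omega
    · have e2 : (s + j) % dim = (s + j - dim) % dim := by
        have h' : s + j = (s + j - dim) + dim * 1 := by ring
        conv_lhs => rw [h']
        rw [Int.add_mul_emod_self_left]
      rw [e1, e2, Int.emod_eq_of_lt (by omega) (by omega)]; omega
  rw [h1, h2]
  rcases eq_or_ne s 0 with h0 | h0
  · have hq0 : 0 ≤ q := by
      by_contra hneg
      push_neg at hneg
      nlinarith
    simp [h3, h0]
    omega
  · have hqge : -1 ≤ q := by
      by_contra hneg
      push_neg at hneg
      nlinarith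
    simp [h3, h0]
    omega

theorem pvMod_bounds (m dim : Int) (hd : 0 < dim) :
    0 ≤ PySem.Int.mod m dim ∧ PySem.Int.mod m dim < dim := by
  rw [PySem.Int.mod_eq_emod_of_pos hd]
  exact ⟨Int.emod_nonneg _ (by omega), Int.emod_lt_of_pos _ hd⟩

-- one step of A's first loop on the closed-form state
theorem stepA_map (dim : Int) (hd : 0 < dim) (m : Int) (hm : 0 ≤ m) :
    PySem.List.pySetD ((List.range dim.toNat).map (fun j : Nat => pvF m dim (j : Int)))
      (PySem.Int.mod m dim)
      (PySem.List.pyGetD ((List.range dim.toNat).map (fun j : Nat => pvF m dim (j : Int)))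
        (PySem.Int.mod m dim) 0 + 1)
    = (List.range dim.toNat).map (fun j : Nat => pvF (m + 1) dim (j : Int)) := by
  obtain ⟨hm0, hmlt⟩ := pvMod_bounds m dim hd
  have hk : PySem.Int.mod m dim = (((PySem.Int.mod m dim).toNat : Nat) : Int) := by omega
  set k := (PySem.Int.mod m dim).toNat with hkdef
  rw [hk]
  simp only [PySem.List.pyGetD_natCast, PySem.List.pySetD_natCast]
  have hkn : k < dim.toNat := by omega
  rw [List.getD_eq_getElem _ _ (by simp; omega)]
  apply List.ext_getElem
  · simp
  · intro i h1 h2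
    simp only [List.getElem_set, List.getElem_map, List.getElem_range]
    have hilt : (i : Int) < dim := by
      simp at h2; omega
    rw [pvF_step m dim (i : Int) hd hm (by positivity) hilt]
    by_cases hc : k = i
    · have hmi : PySem.Int.mod m dim = (i : Int) := by omega
      simp [hc, hmi]
    · have hne : ¬ PySem.Int.mod m dim = (i : Int) := by omega
      simp [hc, hne]

-- A's first loop in closed form (nonnegative channels)
theorem loopA1 (channels dim : Int) (hd : 0 < dim) (hc : 0 ≤ channels) :
    (PySem.List.pyRange 0 channels 1).foldl
      (fun s i =>
        PySem.List.pySetD s (PySem.Int.mod i dim) (PySem.List.pyGetD s (PySem.Int.mod i dim) 0 + 1))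
      (List.replicate dim.toNat (0 : Int))
    = (List.range dim.toNat).map (fun j : Nat => pvF channels dim (j : Int)) := by
  obtain ⟨c, rfl⟩ := Int.eq_ofNat_of_zero_le hc
  induction c with
  | zero =>
    rw [PySem.List.pyRange_one_eq_nil (by omega)]
    apply List.ext_getElem
    · simp
    · intro i h1 h2
      simp only [List.foldl_nil, List.getElem_replicate, List.getElem_map, List.getElem_range,
        Nat.cast_zero]
      rw [pvF_zero 0 dim (i : Int) hd (by omega) (by positivity)]
  | succ c ih =>
    have hcast : ((c + 1 : Nat) : Int) = (c : Int) + 1 := by push_cast; ring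
    rw [hcast, PySem.List.pyRange_one_succ_right (by positivity), List.foldl_append,
      ih (by positivity)]
    simp only [List.foldl_cons, List.foldl_nil]
    exact stepA_map dim hd (c : Int) (by positivity)

-- A's first loop for negative channels: nothing happens, and all closed-form counts are 0
theorem loopA1_neg (channels dim : Int) (hd : 0 < dim) (hc : channels ≤ 0) :
    List.replicate dim.toNat (0 : Int)
    = (List.range dim.toNat).map (fun j : Nat => pvF channels dim (j : Int)) := by
  apply List.ext_getElem
  · simp
  · intro i h1 h2
    simp only [List.getElem_replicate, List.getElem_map, List.getElem_range]
    rw [pvF_zero channels dim (i : Int) hd hc (by positivity)]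

theorem loopA2_inv (channels dim : Int) (hd : 0 < dim) (m : Nat) (hm : m ≤ dim.toNat - 1) :
    (PySem.List.pyRange 1 (1 + (m : Int)) 1).foldl
      (fun s d => PySem.List.pySetD s d (PySem.List.pyGetD s d 0 + PySem.List.pyGetD s (d - 1) 0))
      (pvMix channels dim 0)
    = pvMix channels dim m := by
  induction m with
  | zero => rw [PySem.List.pyRange_one_eq_nil (by omega)]; rfl
  | succ m ih =>
    have hcast : (1 : Int) + ((m + 1 : Nat) : Int) = (1 + (m : Int)) + 1 := by push_cast; ring
    rw [hcast, PySem.List.pyRange_one_succ_right (by omega), List.foldl_append,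
      ih (by omega)]
    simp only [List.foldl_cons, List.foldl_nil]
    have hidx : (1 : Int) + (m : Int) = (((m + 1 : Nat)) : Int) := by push_cast; ring
    rw [hidx]
    have hidx2 : (((m + 1 : Nat) : Int)) - 1 = ((m : Nat) : Int) := by push_cast; ring
    rw [hidx2]
    simp only [PySem.List.pyGetD_natCast, PySem.List.pySetD_natCast]
    have e1 : (pvMix channels dim m).getD (m + 1) (0 : Int) = pvF channels dim (((m + 1 : Nat)) : Int) := by
      rw [List.getD_eq_getElem _ _ (by simp [pvMix]; omega)]
      simp only [pvMix, List.getElem_map, List.getElem_range]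
      have h' : ¬ (m + 1 ≤ m) := by omega
      simp [h']
    have e2 : (pvMix channels dim m).getD m (0 : Int) = pvG channels dim (m + 1) := by
      rw [List.getD_eq_getElem _ _ (by simp [pvMix]; omega)]
      simp [pvMix]
    rw [e1, e2]
    apply List.ext_getElem
    · simp [pvMix]
    · intro i h1 h2
      simp only [List.getElem_set, pvMix, List.getElem_map, List.getElem_range]
      by_cases hc : m + 1 = i
      · simp only [if_pos hc]
        subst hc
        have h' : m + 1 ≤ m + 1 := le_refl _
        simp only [if_pos h', pvG]
        push_cast
        ring
      · simp only [if_neg hc]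
        by_cases hle : i ≤ m
        · have h' : i ≤ m + 1 := by omega
          simp [hle, h']
        · have h2' : ¬ i ≤ m + 1 := by omega
          simp [hle, h2']

theorem loopA2 (channels dim : Int) (hd : 0 < dim) :
    (PySem.List.pyRange 1 dim 1).foldl
      (fun s d => PySem.List.pySetD s d (PySem.List.pyGetD s d 0 + PySem.List.pyGetD s (d - 1) 0))
      ((List.range dim.toNat).map (fun j : Nat => pvF channels dim (j : Int)))
    = (List.range dim.toNat).map (fun j : Nat => pvG channels dim (j + 1)) := by
  have h0 : (List.range dim.toNat).map (fun j : Nat => pvF channels dim (j : Int)) = pvMix channels dim 0 := by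
    apply List.ext_getElem
    · simp [pvMix]
    · intro i h1 h2
      simp only [pvMix, List.getElem_map, List.getElem_range]
      by_cases hi : i = 0
      · subst hi; simp [pvG]
      · simp [hi]
  have hdim : dim = 1 + ((dim.toNat - 1 : Nat) : Int) := by omega
  have hrange : PySem.List.pyRange 1 dim 1 = PySem.List.pyRange 1 (1 + ((dim.toNat - 1 : Nat) : Int)) 1 := by
    rw [← hdim]
  rw [h0, hrange, loopA2_inv channels dim hd (dim.toNat - 1) (by omega)]
  apply List.ext_getElem
  · simp [pvMix]
  · intro i h1 h2
    simp only [pvMix, List.getElem_map, List.getElem_range]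
    have h' : i ≤ dim.toNat - 1 := by simp [pvMix] at h1; omega
    simp [h']

theorem loopB_inv (channels dim : Int) (hd : 0 < dim) (m : Nat) (hm : (m : Int) ≤ dim) :
    (PySem.List.pyRange 0 (m : Int) 1).foldl
      (fun (p : List Int × Int) j =>
        let t := p.2 + max 0 (PySem.Int.floordiv (channels - j + dim - 1) dim)
        (p.1 ++ [t], t)) ([0], 0)
    = ((List.range (m + 1)).map (fun k : Nat => pvG channels dim k), pvG channels dim m) := by
  induction m with
  | zero => rw [PySem.List.pyRange_one_eq_nil (by omega)]; rfl
  | succ m ih =>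
    have hcast : ((m + 1 : Nat) : Int) = (m : Int) + 1 := by push_cast; ring
    rw [hcast, PySem.List.pyRange_one_succ_right (by positivity), List.foldl_append,
      ih (by omega)]
    simp only [List.foldl_cons, List.foldl_nil]
    have ht : pvG channels dim m + max 0 (PySem.Int.floordiv (channels - (m : Int) + dim - 1) dim)
        = pvG channels dim (m + 1) := by
      simp [pvG, pvF]
    rw [ht]
    conv_rhs => rw [List.range_succ]
    simp

theorem loopB (channels dim : Int) (hd : 0 < dim) :
    get_slice_indice_alt channels dim
    = (List.range (dim.toNat + 1)).map (fun k : Nat => pvG channels dim k) := by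
  unfold get_slice_indice_alt
  have hdim : dim = ((dim.toNat : Nat) : Int) := by omega
  have hrange : PySem.List.pyRange 0 dim 1 = PySem.List.pyRange 0 ((dim.toNat : Nat) : Int) 1 := by
    rw [← hdim]
  rw [hrange, loopB_inv channels dim hd dim.toNat (by omega)]

-- ===== VERDICT (by name: the statement is the Claim_ definition above) =====
theorem get_slice_indice_spec : Claim_equal_get_slice_indice := by
  unfold Claim_equal_get_slice_indice Spec_get_slice_indice Pre_get_slice_indice
  intro channels dim _ hpre
  by_cases hd : 0 < dim
  · have hmain :
        get_slice_indice channels dim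
        = (0 : Int) :: (List.range dim.toNat).map (fun j : Nat => pvG channels dim (j + 1)) := by
      unfold get_slice_indice
      dsimp only
      by_cases hc : 0 ≤ channels
      · rw [loopA1 channels dim hd hc, loopA2 channels dim hd]
      · rw [PySem.List.pyRange_one_eq_nil (show channels ≤ (0 : Int) by omega), List.foldl_nil,
          loopA1_neg channels dim hd (by omega), loopA2 channels dim hd]
    rw [hmain, loopB channels dim hd, List.range_succ_eq_map, List.map_cons, List.map_map]
    simp [pvG, Function.comp]
  · have hc : channels ≤ 0 := by
      rcases hpre with h | h
      · omega
      · exact h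
    unfold get_slice_indice get_slice_indice_alt
    dsimp only
    rw [PySem.List.pyRange_one_eq_nil (show channels ≤ (0 : Int) from hc),
      PySem.List.pyRange_one_eq_nil (show dim ≤ (1 : Int) by omega),
      PySem.List.pyRange_one_eq_nil (show dim ≤ (0 : Int) by omega)]
    have h0 : dim.toNat = 0 := by omega
    simp [h0]
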